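-- pv_equiv track=rewrite | github.com/srisai-chinthakindi/customer-churn-prediction-streamlit | Segregator.py | isCOBOL
-- ===== SOURCE A (Python) =====
-- def checkAreaACondition(line,word):# Checks for Area A in Fixed Format Cobol File
--
--     if isNonComment(line):
--         areaA = line.find(word)
--         if areaA in range(7,11):
--             return True
--     return False
--
-- def checkAreaBcondition(line,word):# Checks for Area B in Fixed Format Cobol File
--     if isNonComment(line):
--         areaB = line.find(word)
--         if areaB in range(11,72):
--             return True
--     return False
--
-- def isCOBOL(lines):
--     Cobol_Constraints = False
--     Cobol_DB2_Constraints = False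
--     Cobol_IMS_Constraints = False
--     Cobol_CSIS_Contraints = False
--
--     for line in lines:
--         if isNonComment(line):
--             # line.upper()
--             if checkAreaACondition(line.upper(),"IDENTIFICATION DIVISION"):
--                 Cobol_Constraints = True
--                 continue
--             if Cobol_Constraints:
--                 if isCOBOL_DB2(line):
--                     Cobol_DB2_Constraints = True
--                     continue
--                 if isCOBOL_IMS(line):
--                     Cobol_IMS_Constraints = True
--                     continue
--                 if isCICS_COBOL(line):
--                     Cobol_CSIS_Contraints = True
--                     continue
--
--     if Cobol_CSIS_Contraints and Cobol_DB2_Constraints: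
--         return "CICS-COBOL-DB2"
--     elif Cobol_CSIS_Contraints and Cobol_IMS_Constraints:
--         return "CICS-COBOL-IMS"
--     elif Cobol_DB2_Constraints:
--         return "COBOL-DB2"
--     elif Cobol_IMS_Constraints:
--         return "COBOL-IMS"
--     elif Cobol_CSIS_Contraints:
--         return "CICS-COBOL"
--     elif Cobol_Constraints:
--         return "COBOL"
--     else:
--         return None
--
-- def isNonComment(line): # Checks for Executable Lines and skipping the Empty lines as Well
--     empty  = line.strip() ==""
--     if empty or "*" in line:
--         return False
--     return True
--
-- def isCOBOL_DB2(line): #check for Possibility of being a COBOL-DB2 file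
--     if isNonComment(line) :
--         if checkAreaBcondition(line,"EXEC SQL"):
--             return True
--     return False
--
-- def isCOBOL_IMS(line):#check for Possibility of being a COBOL-IMS file
--     if isNonComment(line):
--         if checkAreaBcondition(line,"CALL 'CBLTDLI'"):
--             return True
--     return False
--
-- def isCICS_COBOL(line):#check for Possibility of being a COBOL-CSIC file
--     if isNonComment(line) :
--         if checkAreaBcondition(line,"EXEC CICS"):
--             return True
--     return False
-- ===== SOURCE B (Python) =====
-- # B: two-phase scan -- locate the first IDENTIFICATION DIVISION header, then
-- # three independent any() scans over the remaining lines.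
--
-- def _non_comment(line):
--     return line.strip() != "" and "*" not in line
--
-- def _ident_div(line):
--     u = line.upper()
--     return _non_comment(line) and _non_comment(u) and 7 <= u.find("IDENTIFICATION DIVISION") < 11
--
-- def _area_b(line, word):
--     return _non_comment(line) and 11 <= line.find(word) < 72
--
-- def isCOBOL(lines):
--     idx = next((i for i, l in enumerate(lines) if _ident_div(l)), None)
--     if idx is None:
--         return None
--     tail = lines[idx + 1:]
--     db2 = any(_area_b(l, "EXEC SQL") for l in tail)
--     ims = any(_area_b(l, "CALL 'CBLTDLI'") for l in tail)
--     cics = any(_area_b(l, "EXEC CICS") for l in tail)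
--     if cics and db2:
--         return "CICS-COBOL-DB2"
--     if cics and ims:
--         return "CICS-COBOL-IMS"
--     if db2:
--         return "COBOL-DB2"
--     if ims:
--         return "COBOL-IMS"
--     if cics:
--         return "CICS-COBOL"
--     return "COBOL"
-- ===== Notes on version B (the rewrite author's own statement) =====
-- stated objective: alternative
-- what changed: Replaced A's single stateful fold over four boolean flags by a two-phase scan (find the first IDENTIFICATION DIVISION header, then three independent any() scans over the tail); Pre_ excludes files where a line after the header repeats the header while carrying a marker, or carries two or more of the EXEC SQL / CALL 'CBLTDLI' / EXEC CICS markers, because A's continue-driven first-match-wins skipping and B's independent scans are both defensible readings of such lines.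
import Mathlib
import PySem

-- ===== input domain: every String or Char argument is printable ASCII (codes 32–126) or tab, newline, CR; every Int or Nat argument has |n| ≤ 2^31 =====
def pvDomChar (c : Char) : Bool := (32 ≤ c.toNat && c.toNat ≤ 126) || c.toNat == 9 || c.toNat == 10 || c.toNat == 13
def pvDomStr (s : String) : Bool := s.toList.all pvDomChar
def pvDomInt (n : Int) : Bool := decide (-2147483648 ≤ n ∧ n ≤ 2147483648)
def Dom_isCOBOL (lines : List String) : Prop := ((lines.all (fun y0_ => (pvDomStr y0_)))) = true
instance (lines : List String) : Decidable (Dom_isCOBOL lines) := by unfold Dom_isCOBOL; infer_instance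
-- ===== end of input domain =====

-- B replaces A's single stateful four-flag fold by a two-phase scan: find the first
-- IDENTIFICATION DIVISION header, then three independent any() scans over the tail
-- (alternative decomposition, same cost).

-- ===== PORT A =====
def aIsNonComment (line : String) : Bool :=
  let empty := PySem.Str.strip line == ""
  if empty || PySem.Str.isIn "*" line then false else true

def aCheckAreaA (line word : String) : Bool :=
  if aIsNonComment line then
    let areaA := PySem.Str.find line word
    if 7 ≤ areaA ∧ areaA < 11 then true else false
  else false

def aCheckAreaB (line word : String) : Bool :=
  if aIsNonComment line then
    let areaB := PySem.Str.find line word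
    if 11 ≤ areaB ∧ areaB < 72 then true else false
  else false

def aIsDB2 (line : String) : Bool :=
  if aIsNonComment line then
    if aCheckAreaB line "EXEC SQL" then true else false
  else false

def aIsIMS (line : String) : Bool :=
  if aIsNonComment line then
    if aCheckAreaB line "CALL 'CBLTDLI'" then true else false
  else false

def aIsCICS (line : String) : Bool :=
  if aIsNonComment line then
    if aCheckAreaB line "EXEC CICS" then true else false
  else false

-- the loop body of A: state = (Cobol, DB2, IMS, CICS) flags
def aStep (st : Bool × Bool × Bool × Bool) (line : String) : Bool × Bool × Bool × Bool :=
  let (c, d, i, s) := st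
  if aIsNonComment line then
    if aCheckAreaA (PySem.Str.upper line) "IDENTIFICATION DIVISION" then (true, d, i, s)
    else if c then
      if aIsDB2 line then (c, true, i, s)
      else if aIsIMS line then (c, d, true, s)
      else if aIsCICS line then (c, d, i, true)
      else (c, d, i, s)
    else (c, d, i, s)
  else (c, d, i, s)

def isCOBOL (lines : List String) : Option String :=
  let st := lines.foldl aStep (false, false, false, false)
  let c := st.1; let d := st.2.1; let i := st.2.2.1; let s := st.2.2.2
  if s && d then some "CICS-COBOL-DB2"
  else if s && i then some "CICS-COBOL-IMS"
  else if d then some "COBOL-DB2"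
  else if i then some "COBOL-IMS"
  else if s then some "CICS-COBOL"
  else if c then some "COBOL"
  else none

-- ===== PORT B =====
def bNonComment (line : String) : Bool :=
  PySem.Str.strip line != "" && !(PySem.Str.isIn "*" line)

def bIdentDiv (line : String) : Bool :=
  let u := PySem.Str.upper line
  bNonComment line && bNonComment u &&
    (let f := PySem.Str.find u "IDENTIFICATION DIVISION"
     decide (7 ≤ f) && decide (f < 11))

def bAreaB (line word : String) : Bool :=
  bNonComment line &&
    (let f := PySem.Str.find line word
     decide (11 ≤ f) && decide (f < 72))

-- next((i for i, l in enumerate(lines) if _ident_div(l)), None)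
def bFirstIdent : List String → Option Nat
  | [] => none
  | l :: ls => if bIdentDiv l then some 0 else (bFirstIdent ls).map (· + 1)

def isCOBOL_alt (lines : List String) : Option String :=
  match bFirstIdent lines with
  | none => none
  | some idx =>
    let tail := lines.drop (idx + 1)
    let db2 := tail.any (fun l => bAreaB l "EXEC SQL")
    let ims := tail.any (fun l => bAreaB l "CALL 'CBLTDLI'")
    let cics := tail.any (fun l => bAreaB l "EXEC CICS")
    if cics && db2 then some "CICS-COBOL-DB2"
    else if cics && ims then some "CICS-COBOL-IMS"
    else if db2 then some "COBOL-DB2"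
    else if ims then some "COBOL-IMS"
    else if cics then some "CICS-COBOL"
    else some "COBOL"

-- ===== PRECONDITION & SPEC =====
-- a line is "ambiguous": it repeats the IDENTIFICATION DIVISION header while carrying a
-- marker, or carries two or more of the EXEC SQL / CALL 'CBLTDLI' / EXEC CICS markers
def bAmbiguous (l : String) : Bool :=
  let d := bAreaB l "EXEC SQL"
  let i := bAreaB l "CALL 'CBLTDLI'"
  let c := bAreaB l "EXEC CICS"
  (bIdentDiv l && (d || i || c)) || (d && i) || (d && c) || (i && c)

-- Pre_ excludes files where some line after an IDENTIFICATION DIVISION header is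
-- ambiguous in the above sense: there A's continue-driven first-match-wins skipping and
-- B's independent scans are both defensible readings, so neither value is specified.
def Pre_isCOBOL (lines : List String) : Prop :=
  lines.Pairwise (fun x y => bIdentDiv x = true → bAmbiguous y = false)
instance (lines : List String) : Decidable (Pre_isCOBOL lines) := by unfold Pre_isCOBOL; infer_instance

def pvWitness_isCOBOL : List String := ["       IDENTIFICATION DIVISION"]

def Spec_isCOBOL (lines : List String) (out : Option String) : Prop := out = isCOBOL_alt lines
instance (lines : List String) (out : Option String) : Decidable (Spec_isCOBOL lines out) := by unfold Spec_isCOBOL; infer_instance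

-- ===== CLAIM (what is proved, stated in full; the proofs are below) =====
def Claim_equal_isCOBOL : Prop := ∀ (lines : List String), Dom_isCOBOL lines → Pre_isCOBOL lines → Spec_isCOBOL lines (isCOBOL lines)

-- ===== LEMMAS AND PROOFS =====

lemma nc_eq (l : String) : aIsNonComment l = bNonComment l := by
  unfold aIsNonComment bNonComment
  cases h1 : (PySem.Str.strip l == "") <;> cases h2 : PySem.Str.isIn "*" l <;> simp_all

lemma ident_eq (l : String) :
    (aIsNonComment l && aCheckAreaA (PySem.Str.upper l) "IDENTIFICATION DIVISION") = bIdentDiv l := by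
  unfold aCheckAreaA bIdentDiv
  rw [nc_eq, nc_eq]
  cases h1 : bNonComment l <;> cases h2 : bNonComment (PySem.Str.upper l) <;>
    simp [h1, h2] <;> rfl

lemma db2_eq (l : String) : aIsDB2 l = bAreaB l "EXEC SQL" := by
  unfold aIsDB2 aCheckAreaB bAreaB
  rw [nc_eq]
  cases h1 : bNonComment l <;> simp [h1] <;> rfl

lemma ims_eq (l : String) : aIsIMS l = bAreaB l "CALL 'CBLTDLI'" := by
  unfold aIsIMS aCheckAreaB bAreaB
  rw [nc_eq]
  cases h1 : bNonComment l <;> simp [h1] <;> rfl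

lemma cics_eq (l : String) : aIsCICS l = bAreaB l "EXEC CICS" := by
  unfold aIsCICS aCheckAreaB bAreaB
  rw [nc_eq]
  cases h1 : bNonComment l <;> simp [h1] <;> rfl

lemma areaB_nc {l w : String} (h : bNonComment l = false) : bAreaB l w = false := by
  unfold bAreaB; simp [h]

lemma identDiv_nc {l : String} (h : bNonComment l = false) : bIdentDiv l = false := by
  unfold bIdentDiv; simp [h]

-- the step function, rewritten through B's predicates
lemma aStep_char (st : Bool × Bool × Bool × Bool) (l : String) :
    aStep st l =
      if bIdentDiv l then (true, st.2.1, st.2.2.1, st.2.2.2)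
      else if st.1 then
        (st.1,
         st.2.1 || bAreaB l "EXEC SQL",
         st.2.2.1 || (bAreaB l "CALL 'CBLTDLI'" && !bAreaB l "EXEC SQL"),
         st.2.2.2 || (bAreaB l "EXEC CICS" && !bAreaB l "EXEC SQL" && !bAreaB l "CALL 'CBLTDLI'"))
      else st := by
  obtain ⟨c, d, i, s⟩ := st
  unfold aStep
  rw [← ident_eq, db2_eq, ims_eq, cics_eq]
  cases hnc : aIsNonComment l
  · have hb : bNonComment l = false := by rw [← nc_eq]; exact hnc
    cases c <;> simp [areaB_nc hb, identDiv_nc hb]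
  · cases hA : aCheckAreaA (PySem.Str.upper l) "IDENTIFICATION DIVISION" <;> cases c <;>
      cases hd : bAreaB l "EXEC SQL" <;> cases hi : bAreaB l "CALL 'CBLTDLI'" <;>
      cases hs : bAreaB l "EXEC CICS" <;> cases d <;> cases i <;> cases s <;> simp_all

-- after the COBOL flag is set, the fold just ORs A's three guarded predicates
lemma fold_after (ls : List String) (d i s : Bool) :
    ls.foldl aStep (true, d, i, s) =
      (true,
       d || (ls.filter (fun l => !bIdentDiv l)).any (fun l => bAreaB l "EXEC SQL"),
       i || (ls.filter (fun l => !bIdentDiv l)).any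
              (fun l => bAreaB l "CALL 'CBLTDLI'" && !bAreaB l "EXEC SQL"),
       s || (ls.filter (fun l => !bIdentDiv l)).any
              (fun l => bAreaB l "EXEC CICS" && !bAreaB l "EXEC SQL" && !bAreaB l "CALL 'CBLTDLI'")) := by
  induction ls generalizing d i s with
  | nil => simp
  | cons x xs ih =>
    rw [List.foldl_cons, aStep_char]
    cases hx : bIdentDiv x <;> simp [hx, ih, Bool.or_assoc]

-- the whole fold, driven by bFirstIdent
lemma fold_main (ls : List String) :
    ls.foldl aStep (false, false, false, false) =
      (match bFirstIdent ls with
       | none => (false, false, false, false)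
       | some idx =>
         let tl := (ls.drop (idx + 1)).filter (fun l => !bIdentDiv l)
         (true,
          tl.any (fun l => bAreaB l "EXEC SQL"),
          tl.any (fun l => bAreaB l "CALL 'CBLTDLI'" && !bAreaB l "EXEC SQL"),
          tl.any (fun l => bAreaB l "EXEC CICS" && !bAreaB l "EXEC SQL" && !bAreaB l "CALL 'CBLTDLI'"))) := by
  induction ls with
  | nil => simp [bFirstIdent]
  | cons x xs ih =>
    rw [List.foldl_cons, aStep_char]
    cases hx : bIdentDiv x
    · have hfi : bFirstIdent (x :: xs) = (bFirstIdent xs).map (· + 1) := by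
        simp [bFirstIdent, hx]
      simp only [Bool.false_eq_true, if_false, ih, hfi]
      cases h : bFirstIdent xs <;> simp [h]
    · have hfi : bFirstIdent (x :: xs) = some 0 := by simp [bFirstIdent, hx]
      simp only [if_true, hfi]
      rw [fold_after]
      simp

-- on a tail with no ambiguous line, A's guarded filtered anys equal B's independent anys
lemma anys_eq (ls : List String) (h : ∀ l ∈ ls, bAmbiguous l = false) :
    ((ls.filter (fun l => !bIdentDiv l)).any (fun l => bAreaB l "EXEC SQL")
       = ls.any (fun l => bAreaB l "EXEC SQL"))
    ∧ ((ls.filter (fun l => !bIdentDiv l)).any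
         (fun l => bAreaB l "CALL 'CBLTDLI'" && !bAreaB l "EXEC SQL")
       = ls.any (fun l => bAreaB l "CALL 'CBLTDLI'"))
    ∧ ((ls.filter (fun l => !bIdentDiv l)).any
         (fun l => bAreaB l "EXEC CICS" && !bAreaB l "EXEC SQL" && !bAreaB l "CALL 'CBLTDLI'")
       = ls.any (fun l => bAreaB l "EXEC CICS")) := by
  induction ls with
  | nil => simp
  | cons x xs ih =>
    have hx : bAmbiguous x = false := h x (List.mem_cons_self ..)
    have ihx := ih (fun l hl => h l (List.mem_cons_of_mem _ hl))
    unfold bAmbiguous at hx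
    cases hid : bIdentDiv x <;>
      cases hd : bAreaB x "EXEC SQL" <;> cases hi : bAreaB x "CALL 'CBLTDLI'" <;>
      cases hc : bAreaB x "EXEC CICS" <;> simp_all

-- Pre_ gives exactly "no ambiguous line after the first IDENTIFICATION DIVISION header"
lemma pre_tail (ls : List String) (hp : Pre_isCOBOL ls) {idx : Nat}
    (hf : bFirstIdent ls = some idx) :
    ∀ l ∈ ls.drop (idx + 1), bAmbiguous l = false := by
  induction ls generalizing idx with
  | nil => simp [bFirstIdent] at hf
  | cons x xs ih =>
    unfold Pre_isCOBOL at hp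
    rw [List.pairwise_cons] at hp
    by_cases hx : bIdentDiv x = true
    · have : idx = 0 := by simp [bFirstIdent, hx] at hf; omega
      subst this
      intro l hl
      exact hp.1 l hl hx
    · have hfi : bFirstIdent (x :: xs) = (bFirstIdent xs).map (· + 1) := by
        simp [bFirstIdent, hx]
      rw [hfi] at hf
      cases h : bFirstIdent xs with
      | none => simp [h] at hf
      | some j =>
        simp [h] at hf
        subst hf
        intro l hl
        exact ih hp.2 h l hl

-- ===== VERDICT (by name: the statement is the Claim_ definition above) =====
theorem isCOBOL_spec : Claim_equal_isCOBOL := by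
  intro lines _ hp
  unfold Spec_isCOBOL isCOBOL isCOBOL_alt
  rw [fold_main]
  cases h : bFirstIdent lines with
  | none => simp
  | some idx =>
    obtain ⟨h1, h2, h3⟩ := anys_eq (lines.drop (idx + 1)) (pre_tail lines hp h)
    simp only [h1, h2, h3]
    simp
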